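-- pv_equiv track=rewrite | github.com/Meno-NSU/Meno-Demo | source/process_questions_with_vllm.py | pages_to_string
-- ===== SOURCE A (Python) =====
-- from typing import Dict, List, Optional, Tuple, Union
--
-- def pages_to_string(page_numbers: List[int]) -> str:
--     if len(page_numbers) < 1:
--         return ''
--     if len(page_numbers) == 1:
--         return f'p. {page_numbers[0]}'
--     sorted_pages_numbers = sorted(page_numbers)
--     page_ranges = []
--     page_range_start = sorted_pages_numbers[0]
--     prev_page_number = page_range_start
--     for page_number in sorted_pages_numbers[1:]:
--         if page_number > (prev_page_number + 1):
--             page_ranges.append((page_range_start, prev_page_number))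
--             page_range_start = page_number
--         prev_page_number = page_number
--     page_ranges.append((page_range_start, prev_page_number))
--     description_of_pages = 'pp. '
--     description_of_pages += ', '.join([(f'{it[0]}-{it[1]}' if (it[1] > it[0]) else f'{it[0]}') for it in page_ranges])
--     return description_of_pages
-- ===== SOURCE B (Python) =====
-- from itertools import groupby
-- from typing import List
--
--
-- def pages_to_string(page_numbers: List[int]) -> str:
--     if len(page_numbers) < 1:
--         return ''
--     if len(page_numbers) == 1:
--         return f'p. {page_numbers[0]}'
--     pages = sorted(set(page_numbers))
--     parts = []
--     for _, run in groupby(enumerate(pages), key=lambda pair: pair[1] - pair[0]):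
--         run = list(run)
--         start, end = run[0][1], run[-1][1]
--         parts.append(f'{start}-{end}' if end > start else f'{start}')
--     return 'pp. ' + ', '.join(parts)
-- ===== Notes on version B (the rewrite author's own statement) =====
-- stated objective: idiomatic
-- what changed: Replaces A's manual fold carrying (ranges, range_start, prev) state with the idiomatic sorted(set(...)) plus itertools.groupby on (page - index) to gather maximal consecutive runs.
import Mathlib
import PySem

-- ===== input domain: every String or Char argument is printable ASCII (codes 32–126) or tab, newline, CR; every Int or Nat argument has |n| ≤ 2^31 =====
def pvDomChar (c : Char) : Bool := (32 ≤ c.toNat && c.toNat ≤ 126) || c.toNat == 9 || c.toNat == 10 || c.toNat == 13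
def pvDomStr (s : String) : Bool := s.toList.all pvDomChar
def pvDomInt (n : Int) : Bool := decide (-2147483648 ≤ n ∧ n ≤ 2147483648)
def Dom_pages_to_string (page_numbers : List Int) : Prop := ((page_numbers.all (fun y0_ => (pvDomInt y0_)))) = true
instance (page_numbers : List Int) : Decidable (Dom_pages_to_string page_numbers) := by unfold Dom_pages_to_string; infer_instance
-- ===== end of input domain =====

-- B re-implements the range-collapsing with sorted(set(...)) + an itertools.groupby-style
-- grouping on (page - index) instead of A's manual fold with (start, prev) state; objective: idiomatic.

-- ===== PORT A =====
-- loop body of A: state = (page_ranges, page_range_start, prev_page_number)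
def pagesStep (acc : List (Int × Int) × Int × Int) (p : Int) : List (Int × Int) × Int × Int :=
  if p > acc.2.2 + 1 then (acc.1 ++ [(acc.2.1, acc.2.2)], p, p) else (acc.1, acc.2.1, p)

-- f'{it[0]}-{it[1]}' if it[1] > it[0] else f'{it[0]}'
def pagesFmt (it : Int × Int) : String :=
  if it.2 > it.1 then PySem.Int.toStr it.1 ++ "-" ++ PySem.Int.toStr it.2 else PySem.Int.toStr it.1

def pages_to_string (page_numbers : List Int) : String :=
  if page_numbers.length < 1 then "" else
  if page_numbers.length = 1 then "p. " ++ PySem.Int.toStr (PySem.List.pyGetD page_numbers 0 0) else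
  let sorted_pages_numbers := PySem.List.sorted page_numbers (fun x => x) false
  let page_range_start := PySem.List.pyGetD sorted_pages_numbers 0 0
  let st := (PySem.List.slice sorted_pages_numbers (some 1) none).foldl pagesStep
              ([], page_range_start, page_range_start)
  let page_ranges := st.1 ++ [(st.2.1, st.2.2)]
  "pp. " ++ PySem.Str.join ", " (page_ranges.map pagesFmt)

-- ===== PORT B =====
-- itertools.groupby over enumerate(pages) with key pair[1] - pair[0]:
-- adjacent pairs share a group iff their keys are equal
def pagesGroupBy : List (Int × Int) → List (List (Int × Int))
  | [] => []
  | x :: rest =>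
    match pagesGroupBy rest with
    | (y :: g) :: gs =>
      if x.2 - x.1 == y.2 - y.1 then (x :: y :: g) :: gs else [x] :: (y :: g) :: gs
    | _ => [[x]]

-- start, end = run[0][1], run[-1][1]; f'{start}-{end}' if end > start else f'{start}'
def pagesFmtGroup (g : List (Int × Int)) : String :=
  if (g.getLastD (0, 0)).2 > (g.headD (0, 0)).2 then
    PySem.Int.toStr (g.headD (0, 0)).2 ++ "-" ++ PySem.Int.toStr (g.getLastD (0, 0)).2
  else PySem.Int.toStr (g.headD (0, 0)).2

def pages_to_string_alt (page_numbers : List Int) : String :=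
  if page_numbers.length < 1 then "" else
  if page_numbers.length = 1 then "p. " ++ PySem.Int.toStr (PySem.List.pyGetD page_numbers 0 0) else
  let pages := PySem.List.sorted (PySem.Set.ofList page_numbers) (fun x => x) false
  let parts := (pagesGroupBy (PySem.List.enumerate pages 0)).map pagesFmtGroup
  "pp. " ++ PySem.Str.join ", " parts

-- ===== PRECONDITION & SPEC =====
def Spec_pages_to_string (page_numbers : List Int) (out : String) : Prop := out = pages_to_string_alt page_numbers
instance (page_numbers : List Int) (out : String) : Decidable (Spec_pages_to_string page_numbers out) := by unfold Spec_pages_to_string; infer_instance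

-- ===== CLAIM (what is proved, stated in full; the proofs are below) =====
def Claim_equal_pages_to_string : Prop := ∀ (page_numbers : List Int), Dom_pages_to_string page_numbers → Spec_pages_to_string page_numbers (pages_to_string page_numbers)

-- ===== LEMMAS AND PROOFS =====

-- recursion form of A's fold (final append of (start, prev) included)
def ppR (st prev : Int) : List Int → List (Int × Int)
  | [] => [(st, prev)]
  | p :: l => if p > prev + 1 then (st, prev) :: ppR p p l else ppR st p l

-- dedup of a weakly increasing tail against a running previous element
def ppDD (prev : Int) : List Int → List Int
  | [] => []
  | p :: l => if p = prev then ppDD prev l else p :: ppDD p l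

-- maximal runs of consecutive integers
def ppChunks : List Int → List (List Int)
  | [] => []
  | x :: l =>
    match ppChunks l with
    | (y :: c) :: cs => if y = x + 1 then (x :: y :: c) :: cs else [x] :: (y :: c) :: cs
    | _ => [[x]]

def ppPair (c : List Int) : Int × Int := (c.headD 0, c.getLastD 0)

def ppPairsF (st : Int) : List (List Int) → List (Int × Int)
  | c :: cs => (st, c.getLastD 0) :: cs.map ppPair
  | [] => []

theorem foldA (l : List Int) : ∀ (rs : List (Int × Int)) (st pv : Int),
    (l.foldl pagesStep (rs, st, pv)).1 ++
      [((l.foldl pagesStep (rs, st, pv)).2.1, (l.foldl pagesStep (rs, st, pv)).2.2)]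
      = rs ++ ppR st pv l := by
  induction l with
  | nil => intro rs st pv; simp [ppR]
  | cons p l ih =>
    intro rs st pv
    by_cases h : p > pv + 1
    · simp only [List.foldl_cons, pagesStep, if_pos h, ppR, ih]
      simp
    · simp only [List.foldl_cons, pagesStep, if_neg h, ppR, ih]

theorem R_dedup (l : List Int) : ∀ (st prev : Int),
    List.Pairwise (· ≤ ·) (prev :: l) → ppR st prev l = ppR st prev (ppDD prev l) := by
  induction l with
  | nil => intro st prev _; simp [ppDD]
  | cons p l ih =>
    intro st prev hp
    have hle : prev ≤ p := (List.pairwise_cons.1 hp).1 p (by simp)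
    have htl : List.Pairwise (· ≤ ·) (p :: l) := (List.pairwise_cons.1 hp).2
    by_cases he : p = prev
    · subst he
      have hng : ¬ p > p + 1 := by omega
      simp only [ppDD, ppR, if_neg hng]
      exact ih st p htl
    · simp only [ppDD, if_neg he, ppR]
      by_cases hg : p > prev + 1
      · simp only [if_pos hg]
        exact congrArg _ (ih p p htl)
      · simp only [if_neg hg]
        exact ih st p htl

theorem DD_mem (l : List Int) : ∀ (prev x : Int), x ∈ ppDD prev l → x ∈ l := by
  induction l with
  | nil => intro prev x h; simp [ppDD] at h
  | cons p l ih =>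
    intro prev x h
    by_cases he : p = prev
    · simp only [ppDD, if_pos he] at h
      exact List.mem_cons_of_mem _ (ih prev x h)
    · simp only [ppDD, if_neg he, List.mem_cons] at h
      rcases h with h | h
      · simp [h]
      · exact List.mem_cons_of_mem _ (ih p x h)

theorem DD_mem_rev (l : List Int) : ∀ (prev x : Int),
    List.Pairwise (· ≤ ·) (prev :: l) → x ∈ l → x ∈ prev :: ppDD prev l := by
  induction l with
  | nil => intro prev x _ h; simp at h
  | cons p l ih =>
    intro prev x hp h
    have htl : List.Pairwise (· ≤ ·) (p :: l) := (List.pairwise_cons.1 hp).2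
    by_cases he : p = prev
    · subst he
      simp only [ppDD]
      rcases List.mem_cons.1 h with h | h
      · simp [h]
      · exact ih p x htl h
    · simp only [ppDD, if_neg he]
      rcases List.mem_cons.1 h with h | h
      · simp [h]
      · rcases List.mem_cons.1 (ih p x htl h) with h' | h'
        · simp [h']
        · exact List.mem_cons_of_mem _ (List.mem_cons_of_mem _ h')

theorem DD_strict (l : List Int) : ∀ (prev : Int),
    List.Pairwise (· ≤ ·) (prev :: l) → List.Pairwise (· < ·) (prev :: ppDD prev l) := by
  induction l with
  | nil => intro prev _; simp [ppDD]
  | cons p l ih =>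
    intro prev hp
    have hle : prev ≤ p := (List.pairwise_cons.1 hp).1 p (by simp)
    have htl : List.Pairwise (· ≤ ·) (p :: l) := (List.pairwise_cons.1 hp).2
    have hall : ∀ y ∈ l, p ≤ y := (List.pairwise_cons.1 htl).1
    by_cases he : p = prev
    · subst he
      simp only [ppDD]
      exact ih p (by
        refine List.pairwise_cons.2 ⟨hall, (List.pairwise_cons.1 htl).2⟩)
    · have hlt : prev < p := lt_of_le_of_ne hle (fun h => he h.symm)
      simp only [ppDD, if_neg he]
      have hrec := ih p htl
      refine List.pairwise_cons.2 ⟨?_, hrec⟩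
      intro y hy
      rcases List.mem_cons.1 hy with h | h
      · omega
      · have := hall y (DD_mem l p y h)
        omega

theorem chunks_shape (x : Int) (l : List Int) :
    ∃ c cs, ppChunks (x :: l) = (x :: c) :: cs := by
  rcases h : ppChunks l with _ | ⟨_ | ⟨y, c⟩, cs⟩
  · exact ⟨[], [], by simp [ppChunks, h]⟩
  · exact ⟨[], [], by simp [ppChunks, h]⟩
  · by_cases hk : y = x + 1
    · exact ⟨y :: c, cs, by simp [ppChunks, h, hk]⟩
    · exact ⟨[], (y :: c) :: cs, by simp [ppChunks, h, hk]⟩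

theorem gb_shape (x : Int × Int) (rest : List (Int × Int)) :
    ∃ g gs, pagesGroupBy (x :: rest) = (x :: g) :: gs := by
  rcases h : pagesGroupBy rest with _ | ⟨_ | ⟨y, g⟩, gs⟩
  · exact ⟨[], [], by simp [pagesGroupBy, h]⟩
  · exact ⟨[], [], by simp [pagesGroupBy, h]⟩
  · by_cases hk : x.2 - x.1 == y.2 - y.1
    · exact ⟨y :: g, gs, by simp [pagesGroupBy, h, hk]⟩
    · exact ⟨[], (y :: g) :: gs, by simp [pagesGroupBy, h, hk]⟩

theorem gb_chunks (l : List Int) : ∀ (i : Int),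
    (pagesGroupBy (PySem.List.enumerate l i)).map (List.map Prod.snd) = ppChunks l := by
  induction l with
  | nil => intro i; simp [PySem.List.enumerate_nil, pagesGroupBy, ppChunks]
  | cons x l ih =>
    intro i
    rw [PySem.List.enumerate_cons]
    cases l with
    | nil => simp [PySem.List.enumerate_nil, pagesGroupBy, ppChunks]
    | cons y l' =>
      obtain ⟨g, gs, hg⟩ := gb_shape (i + 1, y) (PySem.List.enumerate l' (i + 1 + 1))
      have hrest : pagesGroupBy (PySem.List.enumerate (y :: l') (i + 1)) = ((i + 1, y) :: g) :: gs := by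
        rw [PySem.List.enumerate_cons]; exact hg
      have hIH := ih (i + 1)
      rw [hrest] at hIH
      simp only [List.map_cons] at hIH
      have hcond : (((i : Int), x).2 - ((i : Int), x).1 == ((i + 1 : Int), y).2 - ((i + 1 : Int), y).1) = (y == x + 1) := by
        by_cases hxy : y = x + 1
        · subst hxy; simp
        · have h1 : ¬ (x - i = y - (i + 1)) := by omega
          simp [hxy, h1]
      simp only [pagesGroupBy, hrest, hcond]
      by_cases hxy : y = x + 1
      · subst hxy
        simp only [beq_self_eq_true, if_true, List.map_cons]
        rw [ppChunks, ← hIH]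
        simp
      · have hbe : (y == x + 1) = false := by simp [hxy]
        simp only [hbe, Bool.false_eq_true, if_false]
        rw [ppChunks, ← hIH]
        simp [hxy]

theorem getLastD_map_snd (g : List (Int × Int)) : ∀ (d : Int × Int),
    (g.map Prod.snd).getLastD d.2 = (g.getLastD d).2 := by
  induction g with
  | nil => intro d; simp
  | cons x g ih =>
    intro d
    simp only [List.map_cons, List.getLastD_cons]
    exact ih x

theorem fmt_group (g : List (Int × Int)) :
    pagesFmtGroup g = pagesFmt (ppPair (g.map Prod.snd)) := by
  cases g with
  | nil => simp [pagesFmtGroup, pagesFmt, ppPair]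
  | cons x g' =>
    have h := getLastD_map_snd (x :: g') (0, 0)
    simp only [pagesFmtGroup, pagesFmt, ppPair, List.map_cons, List.headD_cons] at h ⊢
    rw [h]

theorem R_chunks (l : List Int) : ∀ (prev st : Int),
    List.Pairwise (· < ·) (prev :: l) → ppR st prev l = ppPairsF st (ppChunks (prev :: l)) := by
  induction l with
  | nil => intro prev st _; simp [ppChunks, ppPairsF, ppR]
  | cons p l ih =>
    intro prev st hp
    have hlt : prev < p := (List.pairwise_cons.1 hp).1 p (by simp)
    have htl : List.Pairwise (· < ·) (p :: l) := (List.pairwise_cons.1 hp).2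
    obtain ⟨c, cs, hc⟩ := chunks_shape p l
    by_cases he : p = prev + 1
    · have hng : ¬ p > prev + 1 := by omega
      rw [ppR, if_neg hng, ih p st htl, hc]
      conv_rhs => rw [ppChunks, hc]
      simp [ppPairsF, he]
    · have hg : p > prev + 1 := by omega
      rw [ppR, if_pos hg, ih p p htl, hc]
      conv_rhs => rw [ppChunks, hc]
      have hne : ¬ (p = prev + 1) := he
      simp [ppPairsF, hne, ppPair]

theorem main_eq (xs : List Int) : pages_to_string xs = pages_to_string_alt xs := by
  by_cases h0 : xs.length < 1
  · simp [pages_to_string, pages_to_string_alt, h0]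
  · by_cases h1 : xs.length = 1
    · simp [pages_to_string, pages_to_string_alt, h1]
    · have hne : xs ≠ [] := by intro h; subst h; simp at h0
      have hs : PySem.List.sorted xs (fun x => x) false ≠ [] := by
        rw [Ne, PySem.List.sorted_eq_nil_iff]; exact hne
      obtain ⟨h, t, hht⟩ : ∃ h t, PySem.List.sorted xs (fun x => x) false = h :: t := by
        rcases e : PySem.List.sorted xs (fun x => x) false with _ | ⟨h, t⟩
        · exact absurd e hs
        · exact ⟨h, t, rfl⟩
      have hpw : List.Pairwise (· ≤ ·) (h :: t) := by
        have hp := PySem.List.sorted_pairwise xs (fun x => x)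
        rw [hht] at hp; exact hp
      have hstrict : List.Pairwise (· < ·) (h :: ppDD h t) := DD_strict t h hpw
      have hd : PySem.List.sorted (PySem.Set.ofList xs) (fun x => x) false = h :: ppDD h t := by
        apply PySem.List.sorted_eq_of_perm_of_pairwise_lt
        · refine (List.perm_ext_iff_of_nodup ?_ (PySem.Set.nodup_ofList xs)).2 ?_
          · exact List.Pairwise.imp (fun hab => ne_of_lt hab) hstrict
          · intro a
            rw [PySem.Set.mem_ofList]
            constructor
            · intro ha
              rcases List.mem_cons.1 ha with ha | ha
              · have hm : a ∈ h :: t := by simp [ha]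
                rw [← hht] at hm; exact (PySem.List.mem_sorted _ _ _ _).1 hm
              · have hm : a ∈ h :: t := List.mem_cons_of_mem _ (DD_mem t h a ha)
                rw [← hht] at hm; exact (PySem.List.mem_sorted _ _ _ _).1 hm
            · intro ha
              have hm : a ∈ h :: t := by
                rw [← hht]; exact (PySem.List.mem_sorted _ _ _ _).2 ha
              rcases List.mem_cons.1 hm with ha' | ha'
              · simp [ha']
              · exact DD_mem_rev t h a hpw ha'
        · exact hstrict
      obtain ⟨c, cs, hc⟩ := chunks_shape h (ppDD h t)
      simp only [pages_to_string, pages_to_string_alt, if_neg h0, if_neg h1]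
      rw [hht, hd, PySem.List.slice_from_one]
      simp only [List.tail_cons, PySem.List.pyGetD_zero_cons]
      congr 1
      congr 1
      -- A side: fold → ppR → ppPairsF of chunks
      rw [show ((t.foldl pagesStep ([], h, h)).1 ++
            [((t.foldl pagesStep ([], h, h)).2.1, (t.foldl pagesStep ([], h, h)).2.2)])
          = ppR h h t from foldA t [] h h]
      rw [R_dedup t h h hpw, R_chunks (ppDD h t) h h hstrict]
      -- B side: groupby → chunks
      have hb : (pagesGroupBy (PySem.List.enumerate (h :: ppDD h t) 0)).map pagesFmtGroup
          = (ppChunks (h :: ppDD h t)).map (fun ch => pagesFmt (ppPair ch)) := by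
        rw [show (pagesGroupBy (PySem.List.enumerate (h :: ppDD h t) 0)).map pagesFmtGroup
            = ((pagesGroupBy (PySem.List.enumerate (h :: ppDD h t) 0)).map (List.map Prod.snd)).map
                (fun ch => pagesFmt (ppPair ch)) from by
          rw [List.map_map]; exact List.map_congr_left (fun g _ => fmt_group g)]
        rw [gb_chunks (h :: ppDD h t) 0]
      rw [hb, hc]
      simp [ppPairsF, ppPair]

-- ===== VERDICT (by name: the statement is the Claim_ definition above) =====
theorem pages_to_string_spec : Claim_equal_pages_to_string := by
  intro xs _
  unfold Spec_pages_to_string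
  exact main_eq xs
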